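-- pv_equiv track=rewrite | github.com/sankakusango/arxiv-honyaku | src/arxiv_honyaku/core/chunker.py | _split_line_comment_suffix
-- ===== SOURCE A (Python) =====
-- def _split_line_comment_suffix(text: str) -> tuple[str, str]:
--     """1 行を, 本文部分と行末コメント部分へ分ける.
--
--     TeX の ``%`` は行末までをコメント化するため, 翻訳対象へ混ぜると
--     ``.% \\vspace{...}`` のような危険な潰れ方を起こしやすい. 最初の未エスケープ
--     ``%`` 以降を raw として切り出す.
--
--     Args:
--         text: 1行分のTeX文字列.
--
--     Returns:
--         tuple[str, str]: ``%`` より前の本文と, ``%`` を含むコメント部分.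
--     """
--     escaped = False
--     for index, character in enumerate(text):
--         if escaped:
--             escaped = False
--             continue
--         if character == "\\":
--             escaped = True
--             continue
--         if character == "%":
--             return text[:index], text[index:]
--     return text, ""
-- ===== SOURCE B (Python) =====
-- def _split_line_comment_suffix(text: str) -> tuple[str, str]:
--     """Split at the first unescaped '%' using str.find plus a backward
--     backslash-run parity check instead of a stateful escaped-flag scan."""
--     start = 0
--     while True:
--         i = text.find("%", start)
--         if i == -1:
--             return text, ""
--         j = i
--         while j > 0 and text[j - 1] == "\\":
--             j -= 1
--         if (i - j) % 2 == 0: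
--             return text[:i], text[i:]
--         start = i + 1
-- ===== Notes on version B (the rewrite author's own statement) =====
-- stated objective: faster
-- what changed: Replaces the stateful escaped-flag per-character loop with repeated str.find jumps to each comment marker plus a backward backslash-run parity check to decide whether it is escaped.
import Mathlib
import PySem

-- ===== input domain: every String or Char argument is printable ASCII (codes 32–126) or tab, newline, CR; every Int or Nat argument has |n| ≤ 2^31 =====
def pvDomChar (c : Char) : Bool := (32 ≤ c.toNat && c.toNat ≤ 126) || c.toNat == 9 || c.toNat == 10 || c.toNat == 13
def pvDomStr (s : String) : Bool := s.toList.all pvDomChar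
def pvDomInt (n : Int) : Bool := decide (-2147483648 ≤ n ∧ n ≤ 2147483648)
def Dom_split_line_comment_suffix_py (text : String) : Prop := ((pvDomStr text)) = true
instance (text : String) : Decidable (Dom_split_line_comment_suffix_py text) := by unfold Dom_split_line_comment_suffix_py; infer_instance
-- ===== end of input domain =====

-- B replaces A's escaped-flag character loop by str.find jumps with a backward
-- backslash-run parity test; measurably faster (C-level scan vs per-char bytecode).

-- ===== PORT A =====
-- A's for-loop over enumerate(text) with the `escaped` flag and early return;
-- returns the index of the first unescaped '%', or none (the fall-through).
def pvA_loop (cs : List Char) (index : Nat) (escaped : Bool) : Option Nat :=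
  match cs with
  | [] => none
  | character :: rest =>
    if escaped then pvA_loop rest (index + 1) false
    else if character = '\\' then pvA_loop rest (index + 1) true
    else if character = '%' then some index
    else pvA_loop rest (index + 1) false

def split_line_comment_suffix_py (text : String) : String × String :=
  match pvA_loop text.toList 0 false with
  | some index =>
      (String.ofList (PySem.List.slice text.toList none (some (index : Int))),
       String.ofList (PySem.List.slice text.toList (some (index : Int)) none))
  | none => (text, "")

-- ===== PORT B =====
-- inner `while j > 0 and text[j-1] == '\\': j -= 1` of Source B (j is always ≤ len)
def pvB_run (cs : List Char) (j : Nat) : Nat :=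
  match j with
  | 0 => 0
  | j' + 1 => if cs.getD j' ' ' = '\\' then pvB_run cs j' else j' + 1

-- outer `while True` loop of Source B; fuel (cs.length + 1 at the call) only makes the
-- recursion total — `start` strictly increases and is bounded by the length.
def pvB_loop (cs : List Char) (start : Nat) (fuel : Nat) : String × String :=
  match fuel with
  | 0 => (String.ofList cs, "")
  | fuel + 1 =>
    let i := PySem.Chars.findFrom cs ['%'] (start : Int) none
    if i = -1 then (String.ofList cs, "")
    else
      let iN := i.toNat
      let j := pvB_run cs iN
      if (iN - j) % 2 = 0 then
        (String.ofList (PySem.List.slice cs none (some (iN : Int))),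
         String.ofList (PySem.List.slice cs (some (iN : Int)) none))
      else pvB_loop cs (iN + 1) fuel

def split_line_comment_suffix_py_alt (text : String) : String × String :=
  pvB_loop text.toList 0 (text.toList.length + 1)

-- ===== PRECONDITION & SPEC =====
def Spec_split_line_comment_suffix_py (text : String) (out : String × String) : Prop := out = split_line_comment_suffix_py_alt text
instance (text : String) (out : String × String) : Decidable (Spec_split_line_comment_suffix_py text out) := by unfold Spec_split_line_comment_suffix_py; infer_instance

-- ===== CLAIM (what is proved, stated in full; the proofs are below) =====
def Claim_equal_split_line_comment_suffix_py : Prop := ∀ (text : String), Dom_split_line_comment_suffix_py text → Spec_split_line_comment_suffix_py text (split_line_comment_suffix_py text)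

-- ===== LEMMAS AND PROOFS =====

-- the `escaped` flag A's loop carries when it reaches position p
def pvFlag (cs : List Char) : Nat → Bool
  | 0 => false
  | p + 1 => if pvFlag cs p then false else decide (cs.getD p ' ' = '\\')

-- index of the first '%' at position ≥ p that A's flag would accept
def pvFirstQ (cs : List Char) (p : Nat) : Option Nat :=
  if _h : p < cs.length then
    if cs.getD p ' ' = '%' ∧ pvFlag cs p = false then some p
    else pvFirstQ cs (p + 1)
  else none
termination_by cs.length - p

-- shared output shape: split at the found index, or the whole line
def pvOut (cs : List Char) : Option Nat → String × String
  | some i =>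
      (String.ofList (PySem.List.slice cs none (some (i : Int))),
       String.ofList (PySem.List.slice cs (some (i : Int)) none))
  | none => (String.ofList cs, "")

theorem pvB_run_le (cs : List Char) (j : Nat) : pvB_run cs j ≤ j := by
  induction j with
  | zero => simp [pvB_run]
  | succ j ih =>
    simp only [pvB_run]
    split
    · omega
    · omega

-- A's flag at p = parity of the backslash run B scans backwards from p
theorem pvFlag_parity (cs : List Char) (p : Nat) :
    pvFlag cs p = decide ((p - pvB_run cs p) % 2 = 1) := by
  induction p with
  | zero => simp [pvFlag, pvB_run]
  | succ p ih =>
    by_cases h : cs.getD p ' ' = '\\'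
    · have hr : pvB_run cs p ≤ p := pvB_run_le cs p
      simp only [pvFlag, pvB_run, h, if_pos, ih]
      by_cases hp : (p - pvB_run cs p) % 2 = 1
      · simp [hp]; omega
      · simp [hp]; omega
    · simp only [pvFlag, pvB_run, h, ih]
      simp

theorem pvDrop_cons (cs : List Char) (p : Nat) (h : p < cs.length) :
    cs.drop p = cs.getD p ' ' :: cs.drop (p + 1) := by
  rw [List.getD_eq_getElem cs ' ' h]
  exact List.drop_eq_getElem_cons h

-- A's loop, started at p with the flag it would carry there, finds pvFirstQ
theorem pvA_loop_eq_firstQ (cs : List Char) :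
    ∀ n p, p ≤ cs.length → cs.length - p = n →
      pvA_loop (cs.drop p) p (pvFlag cs p) = pvFirstQ cs p := by
  intro n
  induction n with
  | zero =>
    intro p hp hn
    have hpl : p = cs.length := by omega
    rw [hpl, List.drop_length]
    simp [pvA_loop, pvFirstQ]
  | succ n ih =>
    intro p hp hn
    have hlt : p < cs.length := by omega
    have hrec := ih (p + 1) (by omega) (by omega)
    rw [pvDrop_cons cs p hlt]
    by_cases hf : pvFlag cs p = true
    · have hf1 : pvFlag cs (p + 1) = false := by simp only [pvFlag, hf, if_true]
      rw [hf1] at hrec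
      simp only [pvA_loop, hf, if_true]
      rw [hrec]
      conv_rhs => rw [pvFirstQ]
      rw [dif_pos hlt,
        if_neg (fun h => by rw [hf] at h; exact absurd h.2 (by simp))]
    · have hf' : pvFlag cs p = false := by simpa using hf
      by_cases hbs : cs.getD p ' ' = '\\'
      · have hf1 : pvFlag cs (p + 1) = true := by
          simp only [pvFlag, hf', Bool.false_eq_true, if_false]
          exact decide_eq_true hbs
        rw [hf1] at hrec
        simp only [pvA_loop, hf', Bool.false_eq_true, if_false]
        rw [if_pos hbs, hrec]
        conv_rhs => rw [pvFirstQ]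
        rw [dif_pos hlt,
          if_neg (fun h => by rw [hbs] at h; exact absurd h.1 (by decide))]
      · by_cases hpc : cs.getD p ' ' = '%'
        · simp only [pvA_loop, hf', Bool.false_eq_true, if_false]
          rw [if_neg hbs, if_pos hpc]
          conv_rhs => rw [pvFirstQ]
          rw [dif_pos hlt, if_pos (And.intro hpc hf')]
        · have hf1 : pvFlag cs (p + 1) = false := by
            simp only [pvFlag, hf', Bool.false_eq_true, if_false]
            exact decide_eq_false hbs
          rw [hf1] at hrec
          simp only [pvA_loop, hf', Bool.false_eq_true, if_false]
          rw [if_neg hbs, if_neg hpc, hrec]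
          conv_rhs => rw [pvFirstQ]
          rw [dif_pos hlt, if_neg (fun h => hpc h.1)]

-- ['%'] is a prefix of cs.drop q exactly when position q holds '%'
theorem pvPrefix_drop (cs : List Char) (q : Nat) :
    ['%'] <+: cs.drop q ↔ (q < cs.length ∧ cs.getD q ' ' = '%') := by
  constructor
  · intro hpre
    have hne : cs.drop q ≠ [] := by
      intro hnil
      rw [hnil] at hpre
      simpa using hpre.length_le
    have hq : q < cs.length := by
      by_contra hge
      exact hne (List.drop_eq_nil_of_le (by omega))
    refine ⟨hq, ?_⟩
    rw [pvDrop_cons cs q hq] at hpre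
    exact (List.cons_prefix_cons.mp hpre).1.symm
  · intro ⟨hq, hc⟩
    rw [pvDrop_cons cs q hq, hc]
    exact ⟨cs.drop (q + 1), rfl⟩

theorem pvFirstQ_none (cs : List Char) :
    ∀ n p, cs.length - p = n →
      (∀ q, p ≤ q → q < cs.length → cs.getD q ' ' ≠ '%') →
      pvFirstQ cs p = none := by
  intro n
  induction n with
  | zero =>
    intro p hn _
    rw [pvFirstQ]
    simp only [dif_neg (by omega : ¬ p < cs.length)]
  | succ n ih =>
    intro p hn hq
    rw [pvFirstQ]
    have hlt : p < cs.length := by omega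
    have : ¬ (cs.getD p ' ' = '%' ∧ pvFlag cs p = false) := by
      intro ⟨h1, _⟩; exact hq p le_rfl hlt h1
    simp only [dif_pos hlt, if_neg this]
    exact ih (p + 1) (by omega) (fun q h1 h2 => hq q (by omega) h2)

theorem pvFirstQ_congr (cs : List Char) :
    ∀ n p m, m - p = n → p ≤ m →
      (∀ q, p ≤ q → q < m →
        ¬ (q < cs.length ∧ cs.getD q ' ' = '%' ∧ pvFlag cs q = false)) →
      pvFirstQ cs p = pvFirstQ cs m := by
  intro n
  induction n with
  | zero =>
    intro p m hn hpm _
    have : p = m := by omega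
    rw [this]
  | succ n ih =>
    intro p m hn hpm hq
    have hplt : p < m := by omega
    have hstep : pvFirstQ cs p = pvFirstQ cs (p + 1) := by
      rw [pvFirstQ]
      by_cases hl : p < cs.length
      · have : ¬ (cs.getD p ' ' = '%' ∧ pvFlag cs p = false) := by
          intro ⟨h1, h2⟩; exact hq p le_rfl hplt ⟨hl, h1, h2⟩
        simp only [dif_pos hl, if_neg this]
      · rw [pvFirstQ]
        simp only [dif_neg hl, dif_neg (by omega : ¬ p + 1 < cs.length)]
    rw [hstep]
    exact ih (p + 1) m (by omega) (by omega) (fun q h1 h2 => hq q (by omega) h2)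

theorem pvFirstQ_some (cs : List Char) (p i : Nat) (hpi : p ≤ i)
    (hi : i < cs.length) (hc : cs.getD i ' ' = '%') (hf : pvFlag cs i = false)
    (hmin : ∀ q, p ≤ q → q < i → cs.getD q ' ' ≠ '%') :
    pvFirstQ cs p = some i := by
  have hcongr := pvFirstQ_congr cs (i - p) p i (by omega) hpi
    (fun q h1 h2 h => (hmin q h1 h2) h.2.1)
  rw [hcongr, pvFirstQ, dif_pos hi, if_pos (And.intro hc hf)]

-- B's loop computes pvOut of pvFirstQ
theorem pvB_loop_eq (cs : List Char) :
    ∀ fuel start, start ≤ cs.length → cs.length - start < fuel →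
      pvB_loop cs start fuel = pvOut cs (pvFirstQ cs start) := by
  intro fuel
  induction fuel with
  | zero => intro start _ h; omega
  | succ fuel ih =>
    intro start hs hfuel
    rw [pvB_loop]
    by_cases hi : PySem.Chars.findFrom cs ['%'] (start : Int) none = -1
    · have hnone : ¬ ['%'] <:+: cs.drop start :=
        (PySem.Chars.findFrom_natCast_eq_neg_one_iff cs ['%'] start hs).mp hi
      have : pvFirstQ cs start = none := by
        apply pvFirstQ_none cs (cs.length - start) start rfl
        intro q h1 h2 hc
        apply hnone
        have hpre : ['%'] <+: cs.drop q := (pvPrefix_drop cs q).mpr ⟨h2, hc⟩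
        have hdrop : cs.drop q = (cs.drop start).drop (q - start) := by
          rw [List.drop_drop]; congr 1; omega
        rw [hdrop] at hpre
        exact hpre.isInfix.trans (List.drop_suffix _ _).isInfix
      rw [this]
      simp only [pvOut, if_pos hi]
    · obtain ⟨hge, hpre, hmin⟩ :=
        PySem.Chars.findFrom_natCast_spec cs ['%'] start hs hi
      set iN := (PySem.Chars.findFrom cs ['%'] (start : Int) none).toNat with hiN
      obtain ⟨hlen, hchr⟩ := (pvPrefix_drop cs iN).mp hpre
      have hstart_le : start ≤ iN := by omega
      have hminq : ∀ q, start ≤ q → q < iN → cs.getD q ' ' ≠ '%' := by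
        intro q h1 h2 hc
        exact hmin q h1 h2 ((pvPrefix_drop cs q).mpr ⟨by omega, hc⟩)
      simp only [if_neg hi]
      by_cases hpar : (iN - pvB_run cs iN) % 2 = 0
      · have hf : pvFlag cs iN = false := by
          rw [pvFlag_parity]; simp; omega
        rw [pvFirstQ_some cs start iN hstart_le hlen hchr hf hminq]
        simp only [pvOut, if_pos hpar]
      · have hf : pvFlag cs iN = true := by
          rw [pvFlag_parity]; simp; omega
        have hcongr : pvFirstQ cs start = pvFirstQ cs (iN + 1) := by
          apply pvFirstQ_congr cs (iN + 1 - start) start (iN + 1) rfl (by omega)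
          intro q h1 h2
          by_cases hq : q < iN
          · intro h; exact hminq q h1 hq h.2.1
          · have : q = iN := by omega
            subst this
            intro h
            rw [hf] at h
            exact absurd h.2.2 (by simp)
        rw [hcongr, if_neg hpar]
        exact ih (iN + 1) (by omega) (by omega)

-- ===== VERDICT (by name: the statement is the Claim_ definition above) =====
theorem split_line_comment_suffix_py_spec : Claim_equal_split_line_comment_suffix_py := by
  intro text _
  unfold Spec_split_line_comment_suffix_py
  unfold split_line_comment_suffix_py split_line_comment_suffix_py_alt
  rw [pvB_loop_eq text.toList (text.toList.length + 1) 0 (by omega) (by omega)]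
  have hA : pvA_loop text.toList 0 false = pvFirstQ text.toList 0 := by
    have := pvA_loop_eq_firstQ text.toList text.toList.length 0 (by omega) (by omega)
    simpa [pvFlag] using this
  rw [hA]
  cases pvFirstQ text.toList 0 with
  | none => simp [pvOut, String.ofList_toList]
  | some i => simp [pvOut]
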